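-- pv_equiv track=rewrite | github.com/trpaleho75/Python | jira_migration/migration/export.py | map_subset
-- ===== SOURCE A (Python) =====
-- def map_subset(superset_headers: list, subset_headers: list) -> dict:
-- 	"""
-- 	Map columns of subset to a superset of columns. We can't itterate over
-- 	values because list.index() only finds the first value, so we use index
-- 	with range() to ensure that all columns get mapped.
--
-- 	Args:
-- 		superset_headers(list): List of headers to match to.
-- 		subset_headers(list): List of headers to align with superset.
--
-- 	Returns:
-- 		(dict): pairs of superset:subset columns.
-- 	"""
--
-- 	superset_length = len(superset_headers)
--
-- 	subset_length = len(subset_headers)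
-- 	subset_map = {i: -1 for i in range(subset_length)}
-- 	for i in range(subset_length):
-- 		# Get column name and occurrence count
-- 		column_name = subset_headers[i]
-- 		column_name_count = subset_headers.count(column_name)
-- 		# Determine the target index
-- 		if column_name_count > 1:
-- 			# List indices matching value in subset
-- 			subset_indices = []
-- 			for j in range(subset_length):
-- 				if subset_headers[j] == column_name:
-- 					subset_indices.append(j)
-- 			# List indices matching value in superset
-- 			superset_indices = []
-- 			for j in range(superset_length):
-- 				if superset_headers[j] == column_name:
-- 					superset_indices.append(j)
-- 			# Match subset to superset indices
-- 			if len(superset_indices) >= len(subset_indices):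
-- 				for subset_index in subset_indices:
-- 					index = subset_indices.index(subset_index)
-- 					superset_index = superset_indices[index]
-- 					if subset_map[subset_index] == -1:
-- 						subset_map[subset_index] = superset_index
-- 		else:
-- 			superset_index = superset_headers.index(column_name)
-- 			subset_map[i] = superset_index
-- 	return subset_map
-- ===== SOURCE B (Python) =====
-- def map_subset(superset_headers: list, subset_headers: list) -> dict:
-- 	"""Group-by-name re-implementation: single pass over each list building
-- 	name -> positions dicts, then one aligned assignment per name group
-- 	(a unique column keeps list.index, preserving the ValueError when absent)."""
-- 	sup_pos = {}
-- 	for j, name in enumerate(superset_headers):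
-- 		sup_pos[name] = sup_pos.get(name, []) + [j]
-- 	sub_pos = {}
-- 	for i, name in enumerate(subset_headers):
-- 		sub_pos[name] = sub_pos.get(name, []) + [i]
-- 	result = [-1] * len(subset_headers)
-- 	for name, positions in sub_pos.items():
-- 		sups = sup_pos.get(name, [])
-- 		if len(positions) == 1:
-- 			result[positions[0]] = superset_headers.index(name)
-- 		elif len(sups) >= len(positions):
-- 			for k, p in enumerate(positions):
-- 				result[p] = sups[k]
-- 	return dict(enumerate(result))
-- ===== Notes on version B (the rewrite author's own statement) =====
-- stated objective: faster
-- what changed: Replaces A's per-index rescans (count + two index-collecting inner loops per column) by two single-pass name->positions dictionaries and one aligned assignment per distinct name group, keeping list.index only for unique names so the ValueError on a missing unique name is preserved.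
import Mathlib
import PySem

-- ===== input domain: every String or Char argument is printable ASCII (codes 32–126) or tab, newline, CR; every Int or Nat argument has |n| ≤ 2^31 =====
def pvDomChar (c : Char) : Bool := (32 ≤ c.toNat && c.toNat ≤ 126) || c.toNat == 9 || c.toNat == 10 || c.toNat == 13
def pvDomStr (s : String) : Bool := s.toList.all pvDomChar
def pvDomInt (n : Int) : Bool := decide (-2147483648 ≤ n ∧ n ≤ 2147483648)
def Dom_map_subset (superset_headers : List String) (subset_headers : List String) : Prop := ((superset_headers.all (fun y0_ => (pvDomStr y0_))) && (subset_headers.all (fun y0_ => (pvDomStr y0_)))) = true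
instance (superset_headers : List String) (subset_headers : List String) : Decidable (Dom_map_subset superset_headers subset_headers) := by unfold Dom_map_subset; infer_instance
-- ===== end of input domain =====

-- B replaces A's per-index rescans by two single-pass name→positions dictionaries
-- and one aligned assignment per distinct name group (objective: faster).

-- ===== PORT A =====
-- Transliteration of A. Python raises ValueError (list.index) exactly where
-- PySem.List.index? returns none in the unique-name branch; the port leaves the
-- dict unchanged there and Pre_map_subset excludes those inputs. Dict lookups use
-- getD on keys that are always present (the dict is initialised over range(subset_length)).
def map_subset (superset_headers : List String) (subset_headers : List String) : List (Int × Int) :=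
  let superset_length : Int := PySem.List.len superset_headers
  let subset_length : Int := PySem.List.len subset_headers
  let subset_map : PySem.Dict Int Int :=
    (PySem.List.pyRange 0 subset_length 1).foldl (fun d i => d.insert i (-1)) PySem.Dict.empty
  ((PySem.List.pyRange 0 subset_length 1).foldl (fun d i =>
      let column_name : String := PySem.List.pyGetD subset_headers i ""
      let column_name_count : Nat := PySem.List.count subset_headers column_name
      if column_name_count > 1 then
        let subset_indices : List Int :=
          (PySem.List.pyRange 0 subset_length 1).foldl
            (fun acc j => if PySem.List.pyGetD subset_headers j "" == column_name then acc ++ [j] else acc) []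
        let superset_indices : List Int :=
          (PySem.List.pyRange 0 superset_length 1).foldl
            (fun acc j => if PySem.List.pyGetD superset_headers j "" == column_name then acc ++ [j] else acc) []
        if superset_indices.length ≥ subset_indices.length then
          subset_indices.foldl (fun d subset_index =>
            match PySem.List.index? subset_indices subset_index with
            | none => d
            | some idx =>
              let superset_index : Int := PySem.List.pyGetD superset_indices (idx : Int) 0
              if d.getD subset_index 0 == -1 then d.insert subset_index superset_index else d) d
        else d
      else
        match PySem.List.index? superset_headers column_name with
        | none => d  -- Python raises ValueError here; excluded by Pre_map_subset
        | some superset_index => d.insert i (superset_index : Int)) subset_map).items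

-- ===== PORT B =====
-- Transliteration of B (Source B): name→positions dicts built in one pass each,
-- then one aligned assignment per name group into a flat result list.
def map_subset_alt (superset_headers : List String) (subset_headers : List String) : List (Int × Int) :=
  let sup_pos : PySem.Dict String (List Int) :=
    (PySem.List.enumerate superset_headers).foldl
      (fun d p => d.modify p.2 [] (fun l => l ++ [p.1])) PySem.Dict.empty
  let sub_pos : PySem.Dict String (List Int) :=
    (PySem.List.enumerate subset_headers).foldl
      (fun d p => d.modify p.2 [] (fun l => l ++ [p.1])) PySem.Dict.empty
  let result : List Int := List.replicate subset_headers.length (-1)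
  let result : List Int := sub_pos.items.foldl (fun res q =>
      let sups : List Int := sup_pos.getD q.1 []
      if q.2.length = 1 then
        match PySem.List.index? superset_headers q.1 with
        | none => res  -- Python: ValueError from list.index; excluded by Pre_map_subset
        | some k => PySem.List.pySetD res (PySem.List.pyGetD q.2 0 0) (k : Int)
      else if sups.length ≥ q.2.length then
        (PySem.List.enumerate q.2).foldl
          (fun res kp => PySem.List.pySetD res kp.2 (PySem.List.pyGetD sups kp.1 0)) res
      else res) result
  PySem.List.enumerate result

-- ===== PRECONDITION & SPEC =====
-- Pre_ excludes exactly the inputs on which A raises ValueError: some name that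
-- occurs exactly once in subset_headers is absent from superset_headers.
def Pre_map_subset (superset_headers : List String) (subset_headers : List String) : Prop :=
  ∀ name ∈ subset_headers, subset_headers.count name = 1 → name ∈ superset_headers
instance (superset_headers : List String) (subset_headers : List String) : Decidable (Pre_map_subset superset_headers subset_headers) := by unfold Pre_map_subset; infer_instance

def pvWitness_map_subset : List String × List String := (["a", "b"], ["b", "a", "a"])

def Spec_map_subset (superset_headers : List String) (subset_headers : List String) (out : List (Int × Int)) : Prop := out = map_subset_alt superset_headers subset_headers
instance (superset_headers : List String) (subset_headers : List String) (out : List (Int × Int)) : Decidable (Spec_map_subset superset_headers subset_headers out) := by unfold Spec_map_subset; infer_instance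

-- ===== CLAIM (what is proved, stated in full; the proofs are below) =====
def Claim_equal_map_subset : Prop := ∀ (superset_headers : List String) (subset_headers : List String), Dom_map_subset superset_headers subset_headers → Pre_map_subset superset_headers subset_headers → Spec_map_subset superset_headers subset_headers (map_subset superset_headers subset_headers)

-- ===== LEMMAS AND PROOFS =====

-- the list of positions of `name` in `xs` (ascending)
def pvPos (xs : List String) (name : String) : List Int :=
  (PySem.List.pyRange 0 (PySem.List.len xs) 1).filter (fun j => PySem.List.pyGetD xs j "" == name)

-- the common value both programs end with at subset column i
def pvVal (superset_headers subset_headers : List String) (i : Int) : Int :=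
  let name := PySem.List.pyGetD subset_headers i ""
  if (pvPos subset_headers name).length ≤ (pvPos superset_headers name).length then
    PySem.List.pyGetD (pvPos superset_headers name) (((pvPos subset_headers name).idxOf i : Nat) : Int) (-1)
  else -1

-- ----- basic facts about pvPos -----

theorem pvMem_pos (xs : List String) (name : String) (j : Int) :
    j ∈ pvPos xs name ↔ 0 ≤ j ∧ j < (xs.length : Int) ∧ PySem.List.pyGetD xs j "" = name := by
  unfold pvPos
  simp [List.mem_filter, PySem.List.mem_pyRange_one, PySem.List.len_eq, and_assoc]

theorem pvNodup_pos (xs : List String) (name : String) : (pvPos xs name).Nodup :=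
  (PySem.List.nodup_pyRange_one _ _).filter _

theorem pvLen_pos (xs : List String) (name : String) :
    (pvPos xs name).length = List.count name xs := by
  unfold pvPos
  rw [← List.countP_eq_length_filter]
  have hmap := PySem.List.map_pyGetD_pyRange_zero xs ""
  have hstep : List.countP (· == name)
      ((PySem.List.pyRange 0 (PySem.List.len xs)).map (fun j => PySem.List.pyGetD xs j ""))
      = List.countP (fun j => PySem.List.pyGetD xs j "" == name)
          (PySem.List.pyRange 0 (PySem.List.len xs)) := by
    rw [List.countP_map]; rfl
  rw [← hstep, hmap]
  rfl

-- first position of a present name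
theorem pvFirst_pos (sup : List String) (name : String) (k : Nat)
    (h : PySem.List.index? sup name = some k) :
    PySem.List.pyGetD (pvPos sup name) 0 (-1) = (k : Int) := by
  obtain ⟨pre, suf, rfl, hk, hpre⟩ := (PySem.List.index?_eq_some_iff sup name k).mp h
  have hlen : PySem.List.len (pre ++ name :: suf)
      = (pre.length : Int) + 1 + (suf.length : Int) := by
    rw [PySem.List.len_eq]
    push_cast [List.length_append, List.length_cons]
    ring
  have hsplit := PySem.List.pyRange_one_append 0 (pre.length : Int)
      (PySem.List.len (pre ++ name :: suf)) (by positivity) (by rw [hlen]; omega)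
  unfold pvPos
  rw [hsplit, List.filter_append]
  have h1 : List.filter (fun j => PySem.List.pyGetD (pre ++ name :: suf) j "" == name)
      (PySem.List.pyRange 0 (pre.length : Int)) = [] := by
    rw [List.filter_eq_nil_iff]
    intro j hj
    have hm := PySem.List.mem_pyRange_one.mp hj
    have hlt : j.toNat < pre.length := by omega
    have hjlen : j < ((pre ++ name :: suf).length : Int) := by
      push_cast [List.length_append, List.length_cons]
      omega
    rw [PySem.List.pyGetD_eq_getElem _ _ hm.1 hjlen]
    rw [List.getElem_append_left hlt]
    simp only [beq_iff_eq]
    intro he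
    exact hpre (he ▸ List.getElem_mem hlt)
  rw [h1, List.nil_append]
  have hcons : PySem.List.pyRange (pre.length : Int) (PySem.List.len (pre ++ name :: suf))
      = (pre.length : Int) :: PySem.List.pyRange ((pre.length : Int) + 1)
          (PySem.List.len (pre ++ name :: suf)) := by
    apply PySem.List.pyRange_one_cons
    rw [hlen]; omega
  rw [hcons, List.filter_cons]
  have hval : PySem.List.pyGetD (pre ++ name :: suf) (pre.length : Int) "" = name := by
    have hb : (pre.length : Int) < ((pre ++ name :: suf).length : Int) := by
      push_cast [List.length_append, List.length_cons]
      omega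
    rw [PySem.List.pyGetD_eq_getElem _ _ (by positivity) hb]
    simp
  simp only [hval, beq_self_eq_true, if_true]
  rw [PySem.List.pyGetD_zero_cons, hk]

theorem pvIndex?_some {α : Type} [BEq α] [LawfulBEq α] (l : List α) (v : α) (h : v ∈ l) :
    PySem.List.index? l v = some (l.idxOf v) := by
  rw [PySem.List.index?_eq_idxOf?, List.idxOf_eq_getD_idxOf?]
  rcases hx : List.idxOf? v l with _ | k
  · rw [List.idxOf?_eq_none_iff] at hx; exact absurd h hx
  · rfl

-- first occurrence index is at most any occurrence index
theorem pvIdxOf_le (l : List String) (x : String) (t : Nat) (h : t < l.length)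
    (he : l[t] = x) : l.idxOf x ≤ t := by
  induction l generalizing t with
  | nil => simp at h
  | cons a l ih =>
    cases t with
    | zero => simp_all
    | succ t =>
      simp only [List.getElem_cons_succ] at he
      by_cases hax : a == x
      · simp [List.idxOf_cons, hax]
      · simp only [List.idxOf_cons, hax, cond_false]
        have := ih (t := t) (by simpa using h) he
        omega

-- ----- the range dictionary both programs manipulate -----

def pvRD (n : Int) (g : Int → Int) : PySem.Dict Int Int :=
  PySem.Dict.mk ((PySem.List.pyRange 0 n).map (fun i => (i, g i)))

theorem pvRD_congr {n : Int} {g g' : Int → Int}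
    (h : ∀ i, 0 ≤ i → i < n → g i = g' i) : pvRD n g = pvRD n g' := by
  unfold pvRD
  congr 1
  exact List.map_congr_left (fun i hi => by
    have hm := PySem.List.mem_pyRange_one.mp hi
    rw [h i hm.1 hm.2])

theorem pvRD_get? (n : Int) (g : Int → Int) (j : Int) :
    (pvRD n g).get? j = if 0 ≤ j ∧ j < n then some (g j) else none := by
  unfold pvRD
  have key : ∀ (l : List Int),
      (PySem.Dict.mk (l.map (fun i => (i, g i)))).get? j
        = if j ∈ l then some (g j) else none := by
    intro l
    induction l with
    | nil => simp [PySem.Dict.get?]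
    | cons a l ih =>
      rw [List.map_cons, PySem.Dict.get?_mk_cons]
      by_cases haj : a = j
      · subst haj; simp
      · simp only [beq_iff_eq, haj, if_false, ih, List.mem_cons]
        simp [Ne.symm haj]
  rw [key]
  simp [PySem.List.mem_pyRange_one]

theorem pvRD_getD (n : Int) (g : Int → Int) (j : Int) (d0 : Int) :
    (pvRD n g).getD j d0 = if 0 ≤ j ∧ j < n then g j else d0 := by
  rw [PySem.Dict.getD_eq_get?_getD, pvRD_get?]
  split <;> rfl

theorem pvRD_insert (n : Int) (g : Int → Int) {i : Int} (h0 : 0 ≤ i) (h1 : i < n) (v : Int) :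
    (pvRD n g).insert i v = pvRD n (fun j => if j = i then v else g j) := by
  have hc : (pvRD n g).contains i = true := by
    rw [PySem.Dict.contains_iff_mem_keys]
    unfold pvRD
    rw [PySem.Dict.keys_mk]
    simp [List.map_map, Function.comp, PySem.List.mem_pyRange_one, h0, h1]
  apply PySem.Dict.ext
  rw [PySem.Dict.items_insert_of_contains _ _ hc]
  show List.map _ (List.map _ _) = List.map _ _
  rw [List.map_map]
  exact List.map_congr_left (fun a _ => by
    by_cases hai : a = i
    · subst hai; simp
    · simp [Function.comp, hai])

theorem pvInit (n : Int) :
    (PySem.List.pyRange 0 n).foldl (fun d i => d.insert i (-1)) PySem.Dict.empty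
      = pvRD n (fun _ => -1) := by
  apply PySem.Dict.ext
  rw [PySem.Dict.items_foldl_insert_fresh (PySem.List.pyRange 0 n) (fun a => a)
        (fun _ => (-1 : Int)) PySem.Dict.empty (by intro a _; rfl)
        (by simpa using PySem.List.nodup_pyRange_one 0 n)]
  rfl

-- ----- A-side loop machinery -----

-- A's loop body, named for the proofs (identical to the lambda in map_subset)
def pvStepA (sup sub : List String) (d : PySem.Dict Int Int) (i : Int) : PySem.Dict Int Int :=
  let column_name : String := PySem.List.pyGetD sub i ""
  let column_name_count : Nat := PySem.List.count sub column_name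
  if column_name_count > 1 then
    let subset_indices : List Int :=
      (PySem.List.pyRange 0 (PySem.List.len sub) 1).foldl
        (fun acc j => if PySem.List.pyGetD sub j "" == column_name then acc ++ [j] else acc) []
    let superset_indices : List Int :=
      (PySem.List.pyRange 0 (PySem.List.len sup) 1).foldl
        (fun acc j => if PySem.List.pyGetD sup j "" == column_name then acc ++ [j] else acc) []
    if superset_indices.length ≥ subset_indices.length then
      subset_indices.foldl (fun d subset_index =>
        match PySem.List.index? subset_indices subset_index with
        | none => d
        | some idx =>
          let superset_index : Int := PySem.List.pyGetD superset_indices (idx : Int) 0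
          if d.getD subset_index 0 == -1 then d.insert subset_index superset_index else d) d
    else d
  else
    match PySem.List.index? sup column_name with
    | none => d
    | some superset_index => d.insert i (superset_index : Int)

theorem pvA_as_fold (sup sub : List String) :
    map_subset sup sub
      = ((PySem.List.pyRange 0 (PySem.List.len sub) 1).foldl (pvStepA sup sub)
          ((PySem.List.pyRange 0 (PySem.List.len sub) 1).foldl
            (fun d i => d.insert i (-1)) PySem.Dict.empty)).items := rfl

-- the value at column i after the first t loop iterations
def pvG (sup sub : List String) (t : Int) (i : Int) : Int :=
  if (sub.idxOf (PySem.List.pyGetD sub i "") : Int) < t then pvVal sup sub i else -1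

-- the inner duplicate-branch fold sets every still-unset column of the group
theorem pvInnerA (n : Int) (S sups : List Int)
    (hrange : ∀ j ∈ S, 0 ≤ j ∧ j < n) :
    ∀ (L : List Int), L.Nodup → (∀ j ∈ L, j ∈ S) → ∀ (g : Int → Int),
    L.foldl (fun d subset_index =>
        match PySem.List.index? S subset_index with
        | none => d
        | some idx =>
          let superset_index : Int := PySem.List.pyGetD sups (idx : Int) 0
          if d.getD subset_index 0 == -1 then d.insert subset_index superset_index else d)
      (pvRD n g)
    = pvRD n (fun j =>
        if j ∈ L ∧ g j = -1 then PySem.List.pyGetD sups ((S.idxOf j : Nat) : Int) 0 else g j) := by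
  intro L
  induction L with
  | nil =>
    intro _ _ g
    simp only [List.foldl_nil]
    exact pvRD_congr (fun j _ _ => by simp)
  | cons i L' ih =>
    intro hnd hsub g
    have hiS : i ∈ S := hsub i (List.mem_cons_self ..)
    have hir := hrange i hiS
    rw [List.foldl_cons]
    rw [pvIndex?_some S i hiS]
    simp only [pvRD_getD, hir.1, hir.2, and_self, if_true]
    have hiL' : i ∉ L' := (List.nodup_cons.mp hnd).1
    by_cases hg : g i = -1
    · simp only [hg, beq_self_eq_true, if_true]
      rw [pvRD_insert n g hir.1 hir.2]
      rw [ih (List.nodup_cons.mp hnd).2 (fun j hj => hsub j (List.mem_cons_of_mem _ hj)) _]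
      apply pvRD_congr
      intro j _ _
      by_cases hji : j = i
      · subst hji
        simp [hiL', hg]
      · simp only [hji, if_false]
        by_cases hjL : j ∈ L' <;> simp [hjL, hji]
    · have : (g i == -1) = false := by simpa using hg
      rw [this]
      simp only [Bool.false_eq_true, if_false]
      rw [ih (List.nodup_cons.mp hnd).2 (fun j hj => hsub j (List.mem_cons_of_mem _ hj)) g]
      apply pvRD_congr
      intro j _ _
      by_cases hji : j = i
      · subst hji
        simp [hiL', hg]
      · simp [hji]

-- the value pvVal takes on a column of a group whose guard holds
theorem pvValOf (sup sub : List String) (name : String) (j : Int) (hj0 : 0 ≤ j)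
    (hjn : j < (sub.length : Int)) (hjS : PySem.List.pyGetD sub j "" = name)
    (hguard : (pvPos sub name).length ≤ (pvPos sup name).length) (dflt : Int) :
    pvVal sup sub j
      = PySem.List.pyGetD (pvPos sup name) (((pvPos sub name).idxOf j : Nat) : Int) dflt
      ∧ 0 ≤ pvVal sup sub j := by
  have hjpos : j ∈ pvPos sub name := (pvMem_pos sub name j).mpr ⟨hj0, hjn, hjS⟩
  have hlt : (pvPos sub name).idxOf j < (pvPos sub name).length :=
    List.idxOf_lt_length_iff.mpr hjpos
  have hlt2 : (pvPos sub name).idxOf j < (pvPos sup name).length :=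
    lt_of_lt_of_le hlt hguard
  have hget : ∀ (d0 : Int),
      PySem.List.pyGetD (pvPos sup name) (((pvPos sub name).idxOf j : Nat) : Int) d0
        = (pvPos sup name)[(pvPos sub name).idxOf j] := by
    intro d0
    rw [PySem.List.pyGetD_eq_getElem _ _ (by positivity) (by exact_mod_cast hlt2)]
    simp
  have hV : pvVal sup sub j = (pvPos sup name)[(pvPos sub name).idxOf j] := by
    simp only [pvVal]
    rw [hjS]
    rw [if_pos hguard]
    exact hget (-1)
  refine ⟨by rw [hV, hget dflt], ?_⟩
  rw [hV]
  have hmem' := List.getElem_mem hlt2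
  exact ((pvMem_pos sup name _).mp hmem').1

-- one iteration of A's outer loop updates pvG t to pvG (t+1)
theorem pvStepA_eq (sup sub : List String) (t : Nat) (ht : t < sub.length) :
    pvStepA sup sub (pvRD (sub.length : Int) (pvG sup sub (t : Int))) (t : Int)
      = pvRD (sub.length : Int) (pvG sup sub ((t : Int) + 1)) := by
  have hname : PySem.List.pyGetD sub (t : Int) "" = sub[t] := by
    rw [PySem.List.pyGetD_natCast]
    exact List.getD_eq_getElem sub "" ht
  have hmem : sub[t] ∈ sub := List.getElem_mem ht
  have hsubidx : (PySem.List.pyRange 0 (PySem.List.len sub) 1).foldl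
      (fun acc j => if PySem.List.pyGetD sub j "" == sub[t] then acc ++ [j] else acc) []
      = pvPos sub sub[t] := by
    have h := PySem.List.foldl_append_if (fun j => PySem.List.pyGetD sub j "" == sub[t])
      (fun j => j) (PySem.List.pyRange 0 (PySem.List.len sub) 1) []
    simpa [pvPos] using h
  have hsupidx : (PySem.List.pyRange 0 (PySem.List.len sup) 1).foldl
      (fun acc j => if PySem.List.pyGetD sup j "" == sub[t] then acc ++ [j] else acc) []
      = pvPos sup sub[t] := by
    have h := PySem.List.foldl_append_if (fun j => PySem.List.pyGetD sup j "" == sub[t])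
      (fun j => j) (PySem.List.pyRange 0 (PySem.List.len sup) 1) []
    simpa [pvPos] using h
  have hrange : ∀ j ∈ pvPos sub sub[t], 0 ≤ j ∧ j < (sub.length : Int) := by
    intro j hj
    have := (pvMem_pos sub sub[t] j).mp hj
    exact ⟨this.1, this.2.1⟩
  have hValOf := pvValOf sup sub sub[t]
  have hidx_le : sub.idxOf sub[t] ≤ t := pvIdxOf_le sub sub[t] t ht rfl
  have hFne : ∀ (j : Int), 0 ≤ j → j < (sub.length : Int) →
      PySem.List.pyGetD sub j "" ≠ sub[t] → sub.idxOf (PySem.List.pyGetD sub j "") ≠ t := by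
    intro j hj0 hjn hne hEq
    have hjmem : PySem.List.pyGetD sub j "" ∈ sub := by
      rw [PySem.List.pyGetD_eq_getElem _ _ hj0 hjn]
      exact List.getElem_mem (by omega)
    have hlt := List.idxOf_lt_length_iff.mpr hjmem
    have this2 : sub.getD (sub.idxOf (PySem.List.pyGetD sub j "")) "" = PySem.List.pyGetD sub j "" := by
      rw [List.getD_eq_getElem sub "" hlt]
      exact List.getElem_idxOf hlt
    rw [hEq] at this2
    rw [List.getD_eq_getElem sub "" ht] at this2
    exact hne this2.symm
  simp only [pvStepA, hname, hsubidx, hsupidx]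
  rw [PySem.List.count_eq]
  by_cases hgt : List.count sub[t] sub > 1
  · rw [if_pos hgt]
    by_cases hguard : (pvPos sup sub[t]).length ≥ (pvPos sub sub[t]).length
    · rw [if_pos hguard]
      rw [pvInnerA (sub.length : Int) (pvPos sub sub[t]) (pvPos sup sub[t]) hrange
            (pvPos sub sub[t]) (pvNodup_pos sub sub[t]) (fun _ h => h) (pvG sup sub (t : Int))]
      apply pvRD_congr
      intro j hj0 hjn
      by_cases hjS : PySem.List.pyGetD sub j "" = sub[t]
      · have hjpos : j ∈ pvPos sub sub[t] := (pvMem_pos sub sub[t] j).mpr ⟨hj0, hjn, hjS⟩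
        obtain ⟨hw, hVnn⟩ := hValOf j hj0 hjn hjS hguard 0
        have hlt1 : ((sub.idxOf (PySem.List.pyGetD sub j "")) : Int) < (t : Int) + 1 := by
          rw [hjS]; exact_mod_cast Nat.lt_succ_of_le hidx_le
        unfold pvG
        rw [if_pos hlt1]
        by_cases hFt : ((sub.idxOf (PySem.List.pyGetD sub j "")) : Int) < (t : Int)
        · rw [if_pos hFt]
          rw [if_neg]
          intro hcon
          omega
        · rw [if_neg hFt]
          rw [if_pos ⟨hjpos, rfl⟩]
          exact hw.symm
      · have hjnot : j ∉ pvPos sub sub[t] := by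
          intro hcon
          exact hjS ((pvMem_pos sub sub[t] j).mp hcon).2.2
        have hne := hFne j hj0 hjn hjS
        unfold pvG
        have : (((sub.idxOf (PySem.List.pyGetD sub j "")) : Int) < (t : Int))
            ↔ (((sub.idxOf (PySem.List.pyGetD sub j "")) : Int) < (t : Int) + 1) := by
          constructor <;> intro <;> [omega; (have := hne; omega)]
        by_cases hFt : ((sub.idxOf (PySem.List.pyGetD sub j "")) : Int) < (t : Int)
        · rw [if_pos hFt, if_pos (this.mp hFt)]
          rw [if_neg (fun hcon => hjnot hcon.1)]
        · rw [if_neg hFt, if_neg (fun hcon => hFt (this.mpr hcon))]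
          rw [if_neg (fun hcon => hjnot hcon.1)]
    · rw [if_neg hguard]
      apply pvRD_congr
      intro j hj0 hjn
      unfold pvG
      by_cases hjS : PySem.List.pyGetD sub j "" = sub[t]
      · have hlt1 : ((sub.idxOf (PySem.List.pyGetD sub j "")) : Int) < (t : Int) + 1 := by
          rw [hjS]; exact_mod_cast Nat.lt_succ_of_le hidx_le
        have hVneg : pvVal sup sub j = -1 := by
          simp only [pvVal]
          rw [hjS, if_neg (by omega)]
        by_cases hFt : ((sub.idxOf (PySem.List.pyGetD sub j "")) : Int) < (t : Int)
        · rw [if_pos hFt, if_pos hlt1]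
        · rw [if_neg hFt, if_pos hlt1, hVneg]
      · have hne := hFne j hj0 hjn hjS
        by_cases hFt : ((sub.idxOf (PySem.List.pyGetD sub j "")) : Int) < (t : Int)
        · rw [if_pos hFt, if_pos (by omega)]
        · rw [if_neg hFt, if_neg (by omega)]
  · rw [if_neg hgt]
    have hcnt1 : List.count sub[t] sub = 1 := by
      have := List.count_pos_iff.mpr hmem
      omega
    have hSlen : (pvPos sub sub[t]).length = 1 := by
      rw [pvLen_pos]; exact hcnt1
    have htS : ((t : Nat) : Int) ∈ pvPos sub sub[t] :=
      (pvMem_pos sub sub[t] (t : Int)).mpr ⟨by positivity, by exact_mod_cast ht, hname⟩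
    have hS : pvPos sub sub[t] = [(t : Int)] := by
      obtain ⟨a, ha⟩ := List.length_eq_one_iff.mp hSlen
      rw [ha] at htS ⊢
      simp at htS
      rw [htS]
    have hidx_eq : sub.idxOf sub[t] = t := by
      have hmem2 : ((sub.idxOf sub[t] : Nat) : Int) ∈ pvPos sub sub[t] := by
        apply (pvMem_pos sub sub[t] _).mpr
        have hlt := List.idxOf_lt_length_iff.mpr hmem
        refine ⟨by positivity, by exact_mod_cast hlt, ?_⟩
        rw [PySem.List.pyGetD_natCast]
        rw [List.getD_eq_getElem sub "" hlt]
        exact List.getElem_idxOf hlt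
      rw [hS] at hmem2
      simp at hmem2
      exact_mod_cast hmem2
    rcases hidx : PySem.List.index? sup sub[t] with _ | k
    · have hnotin : sub[t] ∉ sup := (PySem.List.index?_eq_none_iff sup sub[t]).mp hidx
      apply pvRD_congr
      intro j hj0 hjn
      unfold pvG
      by_cases hjS : PySem.List.pyGetD sub j "" = sub[t]
      · have hVneg : pvVal sup sub j = -1 := by
          simp only [pvVal]
          rw [hjS, if_neg]
          rw [hSlen, pvLen_pos]
          rw [List.count_eq_zero_of_not_mem hnotin]
          omega
        have hlt1 : ((sub.idxOf (PySem.List.pyGetD sub j "")) : Int) < (t : Int) + 1 := by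
          rw [hjS, hidx_eq]; omega
        by_cases hFt : ((sub.idxOf (PySem.List.pyGetD sub j "")) : Int) < (t : Int)
        · rw [if_pos hFt, if_pos hlt1]
        · rw [if_neg hFt, if_pos hlt1, hVneg]
      · have hne := hFne j hj0 hjn hjS
        by_cases hFt : ((sub.idxOf (PySem.List.pyGetD sub j "")) : Int) < (t : Int)
        · rw [if_pos hFt, if_pos (by omega)]
        · rw [if_neg hFt, if_neg (by omega)]
    · show (pvRD (sub.length : Int) (pvG sup sub (t : Int))).insert (t : Int) ((k : Nat) : Int)
          = pvRD (sub.length : Int) (pvG sup sub ((t : Int) + 1))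
      rw [pvRD_insert (sub.length : Int) _ (by positivity) (by exact_mod_cast ht) (k : Int)]
      apply pvRD_congr
      intro j hj0 hjn
      by_cases hji : j = (t : Int)
      · subst hji
        rw [if_pos rfl]
        unfold pvG
        rw [hname, hidx_eq, if_pos (by omega)]
        have hsup_mem : sub[t] ∈ sup := by
          rw [← PySem.List.index?_isSome_iff, hidx]; rfl
        have hV : pvVal sup sub (t : Int) = (k : Int) := by
          simp only [pvVal]
          rw [hname, hS]
          rw [if_pos]
          · simp only [List.idxOf_cons_self, Nat.cast_zero]
            exact pvFirst_pos sup sub[t] k hidx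
          · rw [pvLen_pos]
            have := List.count_pos_iff.mpr hsup_mem
            simp only [List.length_cons, List.length_nil]
            omega
        rw [hV]
      · rw [if_neg hji]
        unfold pvG
        by_cases hjS : PySem.List.pyGetD sub j "" = sub[t]
        · exfalso
          have hjpos : j ∈ pvPos sub sub[t] := (pvMem_pos sub sub[t] j).mpr ⟨hj0, hjn, hjS⟩
          rw [hS] at hjpos
          simp at hjpos
          exact hji hjpos
        · have hne := hFne j hj0 hjn hjS
          by_cases hFt : ((sub.idxOf (PySem.List.pyGetD sub j "")) : Int) < (t : Int)
          · rw [if_pos hFt, if_pos (by omega)]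
          · rw [if_neg hFt, if_neg (by omega)]

theorem pvALoop (sup sub : List String) :
    ∀ (t : Nat), t ≤ sub.length →
    (PySem.List.pyRange 0 (t : Int) 1).foldl (pvStepA sup sub)
        (pvRD (sub.length : Int) (fun _ => -1))
      = pvRD (sub.length : Int) (pvG sup sub (t : Int)) := by
  intro t
  induction t with
  | zero =>
    intro _
    rw [show ((0 : Nat) : Int) = 0 from rfl, PySem.List.pyRange_one_eq_nil (le_refl 0)]
    simp only [List.foldl_nil]
    exact pvRD_congr (fun i _ _ => by
      unfold pvG
      rw [if_neg (by omega)])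
  | succ t ih =>
    intro h
    rw [show ((t + 1 : Nat) : Int) = (t : Int) + 1 by push_cast; ring]
    rw [PySem.List.pyRange_one_succ_right (by positivity), List.foldl_append]
    rw [ih (Nat.le_of_succ_le h), List.foldl_cons, List.foldl_nil]
    exact pvStepA_eq sup sub t (by omega)

theorem pvA_eq (sup sub : List String) :
    map_subset sup sub
      = (PySem.List.pyRange 0 (PySem.List.len sub) 1).map (fun i => (i, pvVal sup sub i)) := by
  rw [pvA_as_fold, pvInit, PySem.List.len_eq]
  rw [pvALoop sup sub sub.length (le_refl _)]
  apply List.map_congr_left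
  intro i hi
  have hm := PySem.List.mem_pyRange_one.mp hi
  unfold pvG
  rw [if_pos]
  have himem : PySem.List.pyGetD sub i "" ∈ sub := by
    rw [PySem.List.pyGetD_eq_getElem _ _ hm.1 hm.2]
    exact List.getElem_mem (by omega)
  exact_mod_cast List.idxOf_lt_length_iff.mpr himem

-- ----- B-side machinery -----

-- B's grouping loop computes name → list of positions
theorem pvGroup_getD (xs : List String) (name : String) :
    ((PySem.List.enumerate xs).foldl
        (fun d p => d.modify p.2 [] (fun l => l ++ [p.1])) PySem.Dict.empty).getD name []
      = pvPos xs name := by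
  have hswap : (PySem.List.enumerate xs).foldl
      (fun d p => d.modify p.2 [] (fun l => l ++ [p.1])) PySem.Dict.empty
      = ((PySem.List.enumerate xs).map Prod.swap).foldl
          (fun d q => d.modify q.1 [] (fun l => l ++ [q.2])) PySem.Dict.empty := by
    rw [List.foldl_map]
    rfl
  rw [hswap, PySem.Dict.getD_foldl_modify_append, PySem.Dict.getD_empty]
  rw [PySem.List.enumerate_eq_map_pyRange xs ""]
  simp only [List.map_map, List.filter_map, List.nil_append, Function.comp_def,
    Prod.swap_prod_mk]
  unfold pvPos
  rw [show (PySem.List.len xs) = ((xs.length : Nat) : Int) from PySem.List.len_eq xs]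
  simp

theorem pvGroup_nodup_keys (xs : List String) :
    ((PySem.List.enumerate xs).foldl
        (fun d p => d.modify p.2 [] (fun l => l ++ [p.1])) PySem.Dict.empty).keys.Nodup :=
  PySem.Dict.nodup_keys_foldl_modify_key (PySem.List.enumerate xs) (fun p => p.2) []
    (fun _ p l => l ++ [p.1]) PySem.Dict.empty PySem.Dict.nodup_keys_empty

theorem pvGroup_items (sub : List String) :
    ((PySem.List.enumerate sub).foldl
        (fun d p => d.modify p.2 [] (fun l => l ++ [p.1])) PySem.Dict.empty).items
      = (PySem.Set.ofList sub).map (fun name => (name, pvPos sub name)) := by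
  have hk : ((PySem.List.enumerate sub).foldl
      (fun d p => d.modify p.2 [] (fun l => l ++ [p.1])) PySem.Dict.empty).keys
      = PySem.Set.ofList sub := by
    rw [PySem.Dict.keys_foldl_modify_key (PySem.List.enumerate sub) (fun p => p.2) []
          (fun _ p l => l ++ [p.1]) PySem.Dict.empty]
    rw [PySem.Dict.keys_empty, PySem.List.map_snd_enumerate]
    exact PySem.Set.update_empty sub
  rw [PySem.Dict.items_eq_map_keys _ (pvGroup_nodup_keys sub) [], hk]
  exact List.map_congr_left (fun name _ => by rw [pvGroup_getD])

-- reading an updated cell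
theorem pvSet_getD (res : List Int) (p j v d : Int) (hp0 : 0 ≤ p)
    (hp : p < (res.length : Int)) (hj : 0 ≤ j) :
    PySem.List.pyGetD (PySem.List.pySetD res p v) j d
      = if j = p then v else PySem.List.pyGetD res j d := by
  obtain ⟨pn, rfl⟩ := Int.eq_ofNat_of_zero_le hp0
  obtain ⟨jn, rfl⟩ := Int.eq_ofNat_of_zero_le hj
  have hpn : pn < res.length := by exact_mod_cast hp
  rw [PySem.List.pySetD_natCast, PySem.List.pyGetD_natCast, PySem.List.pyGetD_natCast]
  by_cases hjp : jn = pn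
  · subst hjp
    simp [List.getD, hpn]
  · have hcast : ¬ ((jn : Int) = (pn : Int)) := by exact_mod_cast hjp
    have hpj : ¬ pn = jn := fun h => hjp h.symm
    simp [List.getD, hpj, hcast]

-- B's per-group assignment loop
theorem pvInnerB (sups : List Int) :
    ∀ (ps : List Int) (s : Int) (res : List Int), ps.Nodup →
      (∀ p ∈ ps, 0 ≤ p ∧ p < (res.length : Int)) →
      ((PySem.List.enumerate ps s).foldl
          (fun res kp => PySem.List.pySetD res kp.2 (PySem.List.pyGetD sups kp.1 0)) res).length
        = res.length
      ∧ ∀ j : Int, 0 ≤ j →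
        PySem.List.pyGetD ((PySem.List.enumerate ps s).foldl
            (fun res kp => PySem.List.pySetD res kp.2 (PySem.List.pyGetD sups kp.1 0)) res) j (-1)
          = if j ∈ ps then PySem.List.pyGetD sups (s + ((ps.idxOf j : Nat) : Int)) 0
            else PySem.List.pyGetD res j (-1) := by
  intro ps
  induction ps with
  | nil =>
    intro s res _ _
    refine ⟨rfl, fun j _ => by simp⟩
  | cons p ps' ih =>
    intro s res hnd hps
    have hp := hps p (List.mem_cons_self ..)
    have hpn : p ∉ ps' := (List.nodup_cons.mp hnd).1
    rw [PySem.List.enumerate_cons, List.foldl_cons]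
    have hlen1 : (PySem.List.pySetD res p (PySem.List.pyGetD sups s 0)).length = res.length :=
      PySem.List.length_pySetD res p _
    obtain ⟨hlen, hval⟩ := ih (s + 1) (PySem.List.pySetD res p (PySem.List.pyGetD sups s 0))
      (List.nodup_cons.mp hnd).2
      (fun q hq => by rw [hlen1]; exact hps q (List.mem_cons_of_mem _ hq))
    refine ⟨by rw [hlen, hlen1], ?_⟩
    intro j hj
    rw [hval j hj]
    by_cases hjps' : j ∈ ps'
    · have hjp : j ≠ p := fun h => hpn (h ▸ hjps')
      rw [if_pos hjps', if_pos (List.mem_cons_of_mem _ hjps')]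
      have hidx : (p :: ps').idxOf j = ps'.idxOf j + 1 := by
        rw [List.idxOf_cons]
        have : (p == j) = false := by simpa using fun h => hjp h.symm
        simp [this]
      rw [hidx]
      congr 1
      push_cast
      ring
    · rw [if_neg hjps']
      rw [pvSet_getD res p j _ (-1) hp.1 hp.2 hj]
      by_cases hjp : j = p
      · subst hjp
        rw [if_pos rfl, if_pos (List.mem_cons_self ..)]
        simp
      · rw [if_neg hjp, if_neg (by simp [hjp, hjps'])]

-- B's loop over the name groups
theorem pvOuterB (sup sub : List String) :
    ∀ (names : List String) (res : List Int), res.length = sub.length →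
      (names.foldl (fun res name =>
          if (pvPos sub name).length = 1 then
            match PySem.List.index? sup name with
            | none => res
            | some k => PySem.List.pySetD res (PySem.List.pyGetD (pvPos sub name) 0 0) (k : Int)
          else if (pvPos sup name).length ≥ (pvPos sub name).length then
            (PySem.List.enumerate (pvPos sub name)).foldl
              (fun res kp => PySem.List.pySetD res kp.2 (PySem.List.pyGetD (pvPos sup name) kp.1 0)) res
          else res) res).length = sub.length
      ∧ ∀ j : Int, 0 ≤ j → j < (sub.length : Int) →
        PySem.List.pyGetD (names.foldl (fun res name =>
            if (pvPos sub name).length = 1 then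
              match PySem.List.index? sup name with
              | none => res
              | some k => PySem.List.pySetD res (PySem.List.pyGetD (pvPos sub name) 0 0) (k : Int)
            else if (pvPos sup name).length ≥ (pvPos sub name).length then
              (PySem.List.enumerate (pvPos sub name)).foldl
                (fun res kp => PySem.List.pySetD res kp.2 (PySem.List.pyGetD (pvPos sup name) kp.1 0)) res
            else res) res) j (-1)
          = if PySem.List.pyGetD sub j "" ∈ names
               ∧ (pvPos sub (PySem.List.pyGetD sub j "")).length
                   ≤ (pvPos sup (PySem.List.pyGetD sub j "")).length
            then pvVal sup sub j else PySem.List.pyGetD res j (-1) := by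
  intro names
  induction names with
  | nil =>
    intro res hres
    exact ⟨hres, fun j _ _ => by simp⟩
  | cons name rest ih =>
    intro res hres
    rw [List.foldl_cons]
    -- the state after processing the first group
    have hres1 : (if (pvPos sub name).length = 1 then
        match PySem.List.index? sup name with
        | none => res
        | some k => PySem.List.pySetD res (PySem.List.pyGetD (pvPos sub name) 0 0) (k : Int)
        else if (pvPos sup name).length ≥ (pvPos sub name).length then
        (PySem.List.enumerate (pvPos sub name)).foldl
          (fun res kp => PySem.List.pySetD res kp.2 (PySem.List.pyGetD (pvPos sup name) kp.1 0)) res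
        else res).length = sub.length := by
      by_cases h1 : (pvPos sub name).length = 1
      · rw [if_pos h1]
        rcases hidx : PySem.List.index? sup name with _ | k
        · exact hres
        · rw [PySem.List.length_pySetD]
          exact hres
      · rw [if_neg h1]
        split
        · rw [(pvInnerB (pvPos sup name) (pvPos sub name) 0 res (pvNodup_pos sub name)
              (fun q hq => by
                have := (pvMem_pos sub name q).mp hq
                exact ⟨this.1, by rw [hres]; exact this.2.1⟩)).1]
          exact hres
        · exact hres
    obtain ⟨hlen, hval⟩ := ih _ hres1
    refine ⟨hlen, ?_⟩
    intro j hj0 hjn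
    rw [hval j hj0 hjn]
    -- how the first group changed cell j
    have hcell : PySem.List.pyGetD (if (pvPos sub name).length = 1 then
        match PySem.List.index? sup name with
        | none => res
        | some k => PySem.List.pySetD res (PySem.List.pyGetD (pvPos sub name) 0 0) (k : Int)
        else if (pvPos sup name).length ≥ (pvPos sub name).length then
        (PySem.List.enumerate (pvPos sub name)).foldl
          (fun res kp => PySem.List.pySetD res kp.2 (PySem.List.pyGetD (pvPos sup name) kp.1 0)) res
        else res) j (-1)
        = if PySem.List.pyGetD sub j "" = name
              ∧ (pvPos sub name).length ≤ (pvPos sup name).length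
          then pvVal sup sub j else PySem.List.pyGetD res j (-1) := by
      by_cases h1 : (pvPos sub name).length = 1
      · obtain ⟨p, hp⟩ := List.length_eq_one_iff.mp h1
        have hpmem : p ∈ pvPos sub name := by rw [hp]; exact List.mem_cons_self ..
        have hpfacts := (pvMem_pos sub name p).mp hpmem
        rw [if_pos h1]
        rcases hidx : PySem.List.index? sup name with _ | k
        · have hnotin : name ∉ sup := (PySem.List.index?_eq_none_iff sup name).mp hidx
          have hsups0 : (pvPos sup name).length = 0 := by
            rw [pvLen_pos]
            exact List.count_eq_zero_of_not_mem hnotin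
          rw [if_neg]
          intro hcon
          rw [h1, hsups0] at hcon
          omega
        · have hkmem : name ∈ sup := by
            rw [← PySem.List.index?_isSome_iff, hidx]; rfl
          have hguard : (pvPos sub name).length ≤ (pvPos sup name).length := by
            rw [h1, pvLen_pos]
            have := List.count_pos_iff.mpr hkmem
            omega
          have hget0 : PySem.List.pyGetD (pvPos sub name) 0 0 = p := by
            rw [hp, PySem.List.pyGetD_zero_cons]
          rw [hget0, pvSet_getD res p j _ (-1) hpfacts.1 (by rw [hres]; exact hpfacts.2.1) hj0]
          by_cases hjp : j = p
          · subst hjp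
            rw [if_pos rfl, if_pos ⟨hpfacts.2.2, hguard⟩]
            obtain ⟨hw, _⟩ := pvValOf sup sub name j hpfacts.1 hjn hpfacts.2.2 hguard (-1)
            rw [hw, hp]
            simp only [List.idxOf_cons_self, Nat.cast_zero]
            exact (pvFirst_pos sup name k hidx).symm
          · rw [if_neg hjp, if_neg]
            intro hcon
            have hjmem : j ∈ pvPos sub name := (pvMem_pos sub name j).mpr ⟨hj0, hjn, hcon.1⟩
            rw [hp] at hjmem
            simp at hjmem
            exact hjp hjmem
      · rw [if_neg h1]
        by_cases hguard : (pvPos sup name).length ≥ (pvPos sub name).length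
        · rw [if_pos hguard]
          rw [(pvInnerB (pvPos sup name) (pvPos sub name) 0 res (pvNodup_pos sub name)
              (fun q hq => by
                have := (pvMem_pos sub name q).mp hq
                exact ⟨this.1, by rw [hres]; exact this.2.1⟩)).2 j hj0]
          by_cases hjS : PySem.List.pyGetD sub j "" = name
          · have hjpos : j ∈ pvPos sub name := (pvMem_pos sub name j).mpr ⟨hj0, hjn, hjS⟩
            rw [if_pos hjpos, if_pos ⟨hjS, hguard⟩]
            rw [zero_add]
            exact ((pvValOf sup sub name j hj0 hjn hjS hguard 0).1).symm
          · have hjnot : j ∉ pvPos sub name := fun h => hjS ((pvMem_pos sub name j).mp h).2.2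
            rw [if_neg hjnot, if_neg (fun h => hjS h.1)]
        · rw [if_neg hguard, if_neg (fun h => hguard h.2)]
    by_cases hjr : (PySem.List.pyGetD sub j "" ∈ rest
        ∧ (pvPos sub (PySem.List.pyGetD sub j "")).length
            ≤ (pvPos sup (PySem.List.pyGetD sub j "")).length)
    · rw [if_pos hjr, if_pos ⟨List.mem_cons_of_mem _ hjr.1, hjr.2⟩]
    · rw [if_neg hjr, hcell]
      by_cases hjn2 : PySem.List.pyGetD sub j "" = name
      · by_cases hguard : (pvPos sub name).length ≤ (pvPos sup name).length
        · rw [if_pos ⟨hjn2, hguard⟩,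
              if_pos ⟨by rw [hjn2]; exact List.mem_cons_self .., by rw [hjn2]; exact hguard⟩]
        · rw [if_neg (fun h => hguard h.2), if_neg]
          intro h
          exact hguard (by rw [← hjn2]; exact h.2)
      · rw [if_neg (fun h => hjn2 h.1), if_neg]
        intro h
        rcases List.mem_cons.mp h.1 with h1 | h1
        · exact hjn2 h1
        · exact hjr ⟨h1, h.2⟩

-- a fresh cell still holds -1
theorem pvRep_getD (n : Nat) (j : Int) (hj : 0 ≤ j) :
    PySem.List.pyGetD (List.replicate n (-1 : Int)) j (-1) = -1 := by
  obtain ⟨jn, rfl⟩ := Int.eq_ofNat_of_zero_le hj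
  rw [PySem.List.pyGetD_natCast]
  by_cases h : jn < n
  · rw [List.getD_eq_getElem _ _ (by simpa using h)]
    simp
  · rw [List.getD_eq_default _ _ (by simpa using h)]

theorem pvB_eq (sup sub : List String) :
    map_subset_alt sup sub
      = (PySem.List.pyRange 0 (PySem.List.len sub) 1).map (fun i => (i, pvVal sup sub i)) := by
  obtain ⟨hlen, hval⟩ := pvOuterB sup sub (PySem.Set.ofList sub)
    (List.replicate sub.length (-1)) (List.length_replicate ..)
  simp only [map_subset_alt]
  rw [pvGroup_items sub]
  simp only [List.foldl_map, pvGroup_getD]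
  rw [PySem.List.enumerate_eq_map_pyRange _ (-1)]
  rw [show PySem.List.len ((PySem.Set.ofList sub).foldl (fun res name =>
      if (pvPos sub name).length = 1 then
        match PySem.List.index? sup name with
        | none => res
        | some k => PySem.List.pySetD res (PySem.List.pyGetD (pvPos sub name) 0 0) (k : Int)
      else if (pvPos sup name).length ≥ (pvPos sub name).length then
        (PySem.List.enumerate (pvPos sub name)).foldl
          (fun res kp => PySem.List.pySetD res kp.2 (PySem.List.pyGetD (pvPos sup name) kp.1 0)) res
      else res) (List.replicate sub.length (-1))) = PySem.List.len sub by
    rw [PySem.List.len_eq, PySem.List.len_eq, hlen]]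
  apply List.map_congr_left
  intro j hj
  have hm := PySem.List.mem_pyRange_one.mp hj
  have hjn : j < (sub.length : Int) := by
    have := hm.2
    rwa [PySem.List.len_eq] at this
  congr 1
  rw [hval j hm.1 hjn]
  have hname_mem : PySem.List.pyGetD sub j "" ∈ PySem.Set.ofList sub := by
    rw [PySem.Set.mem_ofList]
    rw [PySem.List.pyGetD_eq_getElem _ _ hm.1 hjn]
    exact List.getElem_mem (by omega)
  by_cases hguard : (pvPos sub (PySem.List.pyGetD sub j "")).length
      ≤ (pvPos sup (PySem.List.pyGetD sub j "")).length
  · rw [if_pos ⟨hname_mem, hguard⟩]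
  · rw [if_neg (fun h => hguard h.2), pvRep_getD sub.length j hm.1]
    simp only [pvVal]
    rw [if_neg hguard]

-- ===== VERDICT (by name: the statement is the Claim_ definition above) =====
theorem map_subset_spec : Claim_equal_map_subset := by
  intro sup sub _ _
  unfold Spec_map_subset
  rw [pvA_eq, pvB_eq]
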